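-- pv_equiv track=rewrite | github.com/kenhuangus/ZeroTrustAgent | zta_agent/integrations/bedrock_agent_adapter.py | _validate_kb_query
-- ===== SOURCE A (Python) =====
-- def _validate_kb_query(query: str) -> bool:
--     """Validate knowledge base query."""
--     if not query or len(query) > 5000:
--         return False
--     suspicious_patterns = ["<script", "javascript:", "drop table", "delete from"]
--     for pattern in suspicious_patterns:
--         if pattern in query.lower():
--             return False
--     return True
-- ===== SOURCE B (Python) =====
-- import re
--
-- _SUSPICIOUS_RE = re.compile("<script|javascript:|drop table|delete from")
--
-- def _validate_kb_query(query: str) -> bool: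
--     """Validate knowledge base query."""
--     if not query or len(query) > 5000:
--         return False
--     return _SUSPICIOUS_RE.search(query.lower()) is None
-- ===== Notes on version B (the rewrite author's own statement) =====
-- stated objective: idiomatic
-- what changed: Replaces the loop of four separate substring scans over query.lower() with one precompiled regex alternation searched in a single left-to-right pass over the lowered query.
import Mathlib
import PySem

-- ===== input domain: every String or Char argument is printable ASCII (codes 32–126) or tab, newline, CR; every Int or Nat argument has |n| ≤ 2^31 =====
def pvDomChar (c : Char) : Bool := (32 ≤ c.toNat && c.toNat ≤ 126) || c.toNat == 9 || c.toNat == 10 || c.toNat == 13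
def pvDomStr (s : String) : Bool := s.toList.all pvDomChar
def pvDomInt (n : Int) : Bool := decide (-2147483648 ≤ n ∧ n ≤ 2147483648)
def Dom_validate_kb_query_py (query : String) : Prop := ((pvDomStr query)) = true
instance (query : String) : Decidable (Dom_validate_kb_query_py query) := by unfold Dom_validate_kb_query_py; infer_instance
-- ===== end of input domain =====

-- B replaces A's loop of four separate substring scans with one precompiled
-- regex-alternation search: a single left-to-right pass over the lowered query.

-- ===== PORT A =====
-- the 'for pattern in suspicious_patterns' loop: first match returns False
def kbLoopA (query : String) : List String → Bool
  | [] => true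
  | p :: rest => if PySem.Str.isIn p (PySem.Str.lower query) then false else kbLoopA query rest

def validate_kb_query_py (query : String) : Bool :=
  if query == "" || (PySem.Str.len query : Int) > 5000 then false
  else kbLoopA query ["<script", "javascript:", "drop table", "delete from"]

-- ===== PORT B =====
-- the compiled alternation of the four literal patterns
def kbPats : List (List Char) :=
  ["<script".toList, "javascript:".toList, "drop table".toList, "delete from".toList]

-- regex .search: one pass, at each position try every branch of the alternation
def kbScan : List Char → Bool
  | [] => kbPats.any (fun p => p.isPrefixOf [])
  | c :: t => if kbPats.any (fun p => p.isPrefixOf (c :: t)) then true else kbScan t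

def validate_kb_query_py_alt (query : String) : Bool :=
  if query == "" || (PySem.Str.len query : Int) > 5000 then false
  else !(kbScan (PySem.Chars.lower query.toList))

-- ===== PRECONDITION & SPEC =====
def Spec_validate_kb_query_py (query : String) (out : Bool) : Prop := out = validate_kb_query_py_alt query
instance (query : String) (out : Bool) : Decidable (Spec_validate_kb_query_py query out) := by unfold Spec_validate_kb_query_py; infer_instance

-- ===== CLAIM (what is proved, stated in full; the proofs are below) =====
def Claim_equal_validate_kb_query_py : Prop := ∀ (query : String), Dom_validate_kb_query_py query → Spec_validate_kb_query_py query (validate_kb_query_py query)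

-- ===== LEMMAS AND PROOFS =====

-- the single-pass scan finds exactly the inputs containing some pattern as an infix
theorem kbScan_true_iff (L : List Char) :
    kbScan L = true ↔ ∃ p ∈ kbPats, p <:+: L := by
  induction L with
  | nil =>
    constructor
    · intro h; exact absurd h (by decide)
    · rintro ⟨p, hp, hinf⟩
      rw [List.infix_nil] at hinf; subst hinf; revert hp; decide
  | cons c t ih =>
    rw [kbScan]
    by_cases h : kbPats.any (fun p => p.isPrefixOf (c :: t)) = true
    · rw [if_pos h]
      simp only [true_iff]
      obtain ⟨p, hp, hpre⟩ := List.any_eq_true.mp h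
      exact ⟨p, hp, (List.isPrefixOf_iff_prefix.mp hpre).isInfix⟩
    · rw [if_neg h, ih]
      constructor
      · rintro ⟨p, hp, hinf⟩; exact ⟨p, hp, List.infix_cons_iff.mpr (Or.inr hinf)⟩
      · rintro ⟨p, hp, hinf⟩
        rcases List.infix_cons_iff.mp hinf with hpre | hinf'
        · exact absurd (show kbPats.any (fun p => p.isPrefixOf (c :: t)) = true from
            List.any_eq_true.mpr ⟨p, hp, List.isPrefixOf_iff_prefix.mpr hpre⟩) h
        · exact ⟨p, hp, hinf'⟩

theorem kbScan_eq_any (L : List Char) :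
    kbScan L = kbPats.any (fun p => PySem.Chars.isIn p L) := by
  rw [Bool.eq_iff_iff, kbScan_true_iff, List.any_eq_true]
  constructor
  · rintro ⟨p, hp, h⟩; exact ⟨p, hp, (PySem.Chars.isIn_iff_infix _ _).mpr h⟩
  · rintro ⟨p, hp, h⟩; exact ⟨p, hp, (PySem.Chars.isIn_iff_infix _ _).mp h⟩

-- ===== VERDICT (by name: the statement is the Claim_ definition above) =====
theorem validate_kb_query_py_spec : Claim_equal_validate_kb_query_py := by
  intro query _
  unfold Spec_validate_kb_query_py validate_kb_query_py validate_kb_query_py_alt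
  by_cases hg : (query == "" || (PySem.Str.len query : Int) > 5000) = true
  · rw [if_pos hg, if_pos hg]
  · rw [if_neg hg, if_neg hg, kbScan_eq_any]
    simp only [kbLoopA, kbPats, List.any_cons, List.any_nil, PySem.Str.isIn_eq,
      PySem.Str.toList_lower]
    split_ifs with h1 h2 h3 h4 <;> simp_all
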